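-- pv_equiv track=rewrite | github.com/Durbek-Gafur/AI-Mizzou | heuristics.py | checkColsForNonly
-- ===== SOURCE A (Python) =====
-- def checkUp(col,row):
--   if row-1<0:
--     return True
--   if col[row-1]!=col[row]:
--     return True
--   return False
--
-- def checkDown(col,row):
--   if row>=len(col) :
--     return True
--   if col[row-1]!=col[row]:
--     return True
--   return False
--
-- def checkColsForNonly(n,matrix,player):
--     ans = []
--     ncols = [player]*n
--     for col in range(len(matrix[0])):
--       col_arr = []
--       for row in range(len(matrix)):
--         col_arr.append(matrix[row][col])
--       for rows2 in range(len(col_arr)):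
--         if ncols == col_arr[rows2:rows2+n] and checkUp(col_arr, rows2) and checkDown(col_arr, rows2+n):
--           ans.append((rows2,col))
--
--     return ans
-- ===== SOURCE B (Python) =====
-- def checkColsForNonly(n, matrix, player):
--     # Single linear scan per column tracking the current run length of `player`;
--     # emit (start, col) whenever a maximal run has length exactly n.
--     ans = []
--     nrows = len(matrix)
--     for col in range(len(matrix[0])):
--         run = 0
--         for row in range(nrows):
--             if matrix[row][col] == player:
--                 run += 1
--             else:
--                 if run == n:
--                     ans.append((row - n, col))
--                 run = 0
--         if run == n:
--             ans.append((nrows - n, col))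
--     return ans
-- ===== Notes on version B (the rewrite author's own statement) =====
-- stated objective: faster
-- what changed: Replaced A's per-position slice comparison col_arr[r:r+n]==[player]*n with boundary probes (O(rows*n) per column) by a single scan per column that tracks the current run length of player and emits (start,col) when a maximal run has length exactly n.
-- outside the precondition, e.g. on checkColsForNonly(0, [[1], [2]], 5): A returns [(0, 0), (1, 0)], B returns [(0, 0), (1, 0), (2, 0)]
import Mathlib
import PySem

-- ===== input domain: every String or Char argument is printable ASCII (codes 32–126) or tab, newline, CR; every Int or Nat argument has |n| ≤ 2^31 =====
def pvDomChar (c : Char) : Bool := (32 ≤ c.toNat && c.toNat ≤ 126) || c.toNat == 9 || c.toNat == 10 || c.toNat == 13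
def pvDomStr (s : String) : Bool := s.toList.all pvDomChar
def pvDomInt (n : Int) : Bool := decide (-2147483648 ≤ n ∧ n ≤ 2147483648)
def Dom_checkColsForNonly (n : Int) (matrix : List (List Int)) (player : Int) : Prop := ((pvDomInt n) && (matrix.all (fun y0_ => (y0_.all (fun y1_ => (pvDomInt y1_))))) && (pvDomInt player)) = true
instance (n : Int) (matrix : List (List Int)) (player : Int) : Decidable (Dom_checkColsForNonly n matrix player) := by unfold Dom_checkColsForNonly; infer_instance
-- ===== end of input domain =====

-- B replaces A's per-position slice comparison by a single run-length scan per column (faster in a timing run).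

-- ===== PORT A =====
def pyCheckUp (col : List Int) (row : Int) : Bool :=
  if row - 1 < 0 then true
  else if PySem.List.pyGetD col (row - 1) 0 ≠ PySem.List.pyGetD col row 0 then true
  else false

def pyCheckDown (col : List Int) (row : Int) : Bool :=
  if PySem.List.len col ≤ row then true
  else if PySem.List.pyGetD col (row - 1) 0 ≠ PySem.List.pyGetD col row 0 then true
  else false

def checkColsForNonly (n : Int) (matrix : List (List Int)) (player : Int) : List (Int × Int) :=
  let ans : List (Int × Int) := []
  let ncols := PySem.List.pyRepeat [player] n
  (PySem.List.pyRange 0 (PySem.List.len (PySem.List.pyGetD matrix 0 [])) 1).foldl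
    (fun ans col =>
      let col_arr := (PySem.List.pyRange 0 (PySem.List.len matrix) 1).foldl
        (fun col_arr row => col_arr ++ [PySem.List.pyGetD (PySem.List.pyGetD matrix row []) col 0]) []
      (PySem.List.pyRange 0 (PySem.List.len col_arr) 1).foldl
        (fun ans rows2 =>
          if ncols = PySem.List.slice col_arr (some rows2) (some (rows2 + n)) ∧
             pyCheckUp col_arr rows2 = true ∧ pyCheckDown col_arr (rows2 + n) = true
          then ans ++ [(rows2, col)] else ans) ans) ans

-- ===== PORT B =====
def checkColsForNonly_alt (n : Int) (matrix : List (List Int)) (player : Int) : List (Int × Int) :=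
  let nrows := PySem.List.len matrix
  (PySem.List.pyRange 0 (PySem.List.len (PySem.List.pyGetD matrix 0 [])) 1).foldl
    (fun ans col =>
      let p := (PySem.List.pyRange 0 nrows 1).foldl
        (fun (s : List (Int × Int) × Int) row =>
          if PySem.List.pyGetD (PySem.List.pyGetD matrix row []) col 0 = player then (s.1, s.2 + 1)
          else (if s.2 = n then s.1 ++ [(row - n, col)] else s.1, 0)) (ans, 0)
      if p.2 = n then p.1 ++ [(nrows - n, col)] else p.1) []

-- ===== PRECONDITION & SPEC =====
-- Pre_ excludes: the empty matrix and matrices whose rows are shorter than row 0 (A raises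
-- IndexError there), and n ≤ 0, where A still returns but its positions are an accident of
-- Python's negative-index wraparound in checkDown (a degenerate "run of length ≤ 0" corner
-- that no caller would specify either way).
def Pre_checkColsForNonly (n : Int) (matrix : List (List Int)) (player : Int) : Prop :=
  1 ≤ n ∧ matrix ≠ [] ∧ ∀ r ∈ matrix, matrix.headI.length ≤ r.length
instance (n : Int) (matrix : List (List Int)) (player : Int) : Decidable (Pre_checkColsForNonly n matrix player) := by unfold Pre_checkColsForNonly; infer_instance

def pvWitness_checkColsForNonly : Int × List (List Int) × Int := (2, [[1, 0], [1, 1], [0, 1]], 1)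

def Spec_checkColsForNonly (n : Int) (matrix : List (List Int)) (player : Int) (out : List (Int × Int)) : Prop := out = checkColsForNonly_alt n matrix player
instance (n : Int) (matrix : List (List Int)) (player : Int) (out : List (Int × Int)) : Decidable (Spec_checkColsForNonly n matrix player out) := by unfold Spec_checkColsForNonly; infer_instance

-- ===== CLAIM (what is proved, stated in full; the proofs are below) =====
def Claim_equal_checkColsForNonly : Prop := ∀ (n : Int) (matrix : List (List Int)) (player : Int), Dom_checkColsForNonly n matrix player → Pre_checkColsForNonly n matrix player → Spec_checkColsForNonly n matrix player (checkColsForNonly n matrix player)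

-- ===== LEMMAS AND PROOFS =====

-- The maximal-run predicate both programs compute, over Nat positions of the column cs:
-- a run of player of length exactly n' starts at r.
def goodRun (n' : Nat) (player : Int) (cs : List Int) (r : Nat) : Bool :=
  decide (r + n' ≤ cs.length ∧
    (∀ j, j < r + n' → r ≤ j → cs.getD j 0 = player) ∧
    (r = 0 ∨ cs.getD (r - 1) 0 ≠ player) ∧
    (r + n' = cs.length ∨ cs.getD (r + n') 0 ≠ player))

lemma take_drop_eq_replicate_iff (cs : List Int) (r n' : Nat) (player : Int) (hn : 1 ≤ n') :
    List.replicate n' player = (cs.drop r).take n' ↔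
      (r + n' ≤ cs.length ∧ ∀ j, j < r + n' → r ≤ j → cs.getD j 0 = player) := by
  constructor
  · intro h
    have hlen : n' = min n' (cs.length - r) := by
      have := congrArg List.length h; simpa using this
    have h1 : r + n' ≤ cs.length := by omega
    refine ⟨h1, ?_⟩
    intro j hj2 hj1
    have hjl : j < cs.length := by omega
    have hidx : j - r < ((cs.drop r).take n').length := by simp; omega
    have e1 : (((cs.drop r).take n')[j - r]'hidx) = (cs[j]'hjl) := by
      simp only [List.getElem_take, List.getElem_drop]
      congr 1; omega
    rw [List.getD_eq_getElem cs 0 hjl, ← e1]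
    simp only [← h, List.getElem_replicate]
  · rintro ⟨h1, h2⟩
    apply List.ext_getElem
    · simp; omega
    · intro i hi1 hi2
      simp only [List.getElem_replicate, List.getElem_take, List.getElem_drop]
      have := h2 (r + i) (by simp at hi1; omega) (by omega)
      rw [List.getD_eq_getElem cs 0 (by simp at hi1; omega)] at this
      exact this.symm

-- A's per-position test (slice comparison plus boundary probes) is exactly goodRun.
lemma condA_eq_good (n' : Nat) (hn : 1 ≤ n') (player : Int) (cs : List Int) (r : Nat) :
    (decide ((PySem.List.pyRepeat [player] (n' : Int)) = PySem.List.slice cs (some (r : Int)) (some ((r : Int) + (n' : Int))) ∧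
      pyCheckUp cs (r : Int) = true ∧ pyCheckDown cs ((r : Int) + (n' : Int)) = true))
    = goodRun n' player cs r := by
  unfold goodRun
  rw [decide_eq_decide]
  rw [PySem.List.pyRepeat_singleton, PySem.List.slice_natCast_add, Int.toNat_natCast,
    take_drop_eq_replicate_iff cs r n' player hn]
  constructor
  · rintro ⟨⟨h1, h2⟩, hu, hd⟩
    refine ⟨h1, h2, ?_, ?_⟩
    · by_cases hr0 : r = 0
      · exact Or.inl hr0
      · refine Or.inr ?_
        unfold pyCheckUp at hu
        rw [if_neg (by omega)] at hu
        have e1 : ((r : Int) - 1) = ((r - 1 : Nat) : Int) := by omega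
        rw [e1, PySem.List.pyGetD_natCast, PySem.List.pyGetD_natCast] at hu
        have hrr : cs.getD r 0 = player := h2 r (by omega) (by omega)
        by_cases hne : cs.getD (r - 1) 0 ≠ cs.getD r 0
        · rw [hrr] at hne; exact hne
        · rw [if_neg hne] at hu; exact absurd hu (by simp)
    · by_cases hend : r + n' = cs.length
      · exact Or.inl hend
      · refine Or.inr ?_
        unfold pyCheckDown at hd
        rw [if_neg (by simp [PySem.List.len_eq]; omega)] at hd
        have e1 : ((r : Int) + (n' : Int) - 1) = ((r + n' - 1 : Nat) : Int) := by omega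
        have e2 : ((r : Int) + (n' : Int)) = ((r + n' : Nat) : Int) := by omega
        rw [e1, e2, PySem.List.pyGetD_natCast, PySem.List.pyGetD_natCast] at hd
        have hlast : cs.getD (r + n' - 1) 0 = player := h2 (r + n' - 1) (by omega) (by omega)
        by_cases hne : cs.getD (r + n' - 1) 0 ≠ cs.getD (r + n') 0
        · rw [hlast] at hne; exact hne.symm
        · rw [if_neg hne] at hd; exact absurd hd (by simp)
  · rintro ⟨h1, h2, h3, h4⟩
    refine ⟨⟨h1, h2⟩, ?_, ?_⟩
    · unfold pyCheckUp
      rcases h3 with hr0 | hne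
      · rw [if_pos (by omega)]
      · by_cases hr0 : r = 0
        · rw [if_pos (by omega)]
        · rw [if_neg (by omega)]
          have e1 : ((r : Int) - 1) = ((r - 1 : Nat) : Int) := by omega
          rw [e1, PySem.List.pyGetD_natCast, PySem.List.pyGetD_natCast]
          have hrr : cs.getD r 0 = player := h2 r (by omega) (by omega)
          rw [if_pos (by rw [hrr]; exact hne)]
    · unfold pyCheckDown
      by_cases hend : cs.length ≤ r + n'
      · rw [if_pos (by simp [PySem.List.len_eq]; omega)]
      · rcases h4 with hend2 | hne
        · exact absurd hend2.ge hend
        rw [if_neg (by simp [PySem.List.len_eq]; omega)]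
        have e1 : ((r : Int) + (n' : Int) - 1) = ((r + n' - 1 : Nat) : Int) := by omega
        have e2 : ((r : Int) + (n' : Int)) = ((r + n' : Nat) : Int) := by omega
        rw [e1, e2, PySem.List.pyGetD_natCast, PySem.List.pyGetD_natCast]
        have hlast : cs.getD (r + n' - 1) 0 = player := h2 (r + n' - 1) (by omega) (by omega)
        rw [if_pos (by rw [hlast]; exact hne.symm)]

lemma filter_range'_eq_singleton (s m a : Nat) (p : Nat → Bool)
    (ha1 : s ≤ a) (ha2 : a < s + m) (hpa : p a = true)
    (hother : ∀ r, s ≤ r → r < s + m → r ≠ a → p r = false) :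
    (List.range' s m).filter p = [a] := by
  have hsplit : List.range' s m = List.range' s (a - s) ++ List.range' a (m - (a - s)) := by
    have := List.range'_append (s := s) (m := a - s) (n := m - (a - s)) (step := 1)
    simp only [one_mul] at this
    rw [show s + (a - s) = a by omega, show a - s + (m - (a - s)) = m by omega] at this
    exact this.symm
  have hsucc : List.range' a (m - (a - s)) = a :: List.range' (a + 1) (m - (a - s) - 1) := by
    rw [show m - (a - s) = (m - (a - s) - 1) + 1 by omega]
    simpa using List.range'_succ (s := a) (n := m - (a - s) - 1) (step := 1)
  rw [hsplit, hsucc, List.filter_append, List.filter_cons]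
  rw [List.filter_eq_nil_iff.mpr, List.filter_eq_nil_iff.mpr]
  · simp [hpa]
  · intro r hr
    rw [List.mem_range'_1] at hr
    simp [hother r (by omega) (by omega) (by omega)]
  · intro r hr
    rw [List.mem_range'_1] at hr
    simp [hother r (by omega) (by omega) (by omega)]

-- At the end of the column, a pending run of length k is good iff k = n'.
lemma filter_end (n' k : Nat) (hn : 1 ≤ n') (player : Int) (cs : List Int) (hk : k ≤ cs.length)
    (hrun : ∀ j, j < cs.length → cs.length - k ≤ j → cs.getD j 0 = player)
    (hb : cs.length - k = 0 ∨ cs.getD (cs.length - k - 1) 0 ≠ player) :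
    (List.range' (cs.length - k) k).filter (goodRun n' player cs)
      = if k = n' then [cs.length - n'] else [] := by
  by_cases hkn : k = n'
  · subst hkn
    rw [if_pos rfl]
    apply filter_range'_eq_singleton _ _ _ _ (by omega) (by omega)
    · unfold goodRun
      apply decide_eq_true
      refine ⟨by omega, ?_, ?_, Or.inl (by omega)⟩
      · intro j hj1 hj2; exact hrun j (by omega) hj2
      · rcases hb with h | h
        · exact Or.inl h
        · exact Or.inr h
    · intro r hr1 hr2 hra
      unfold goodRun
      apply decide_eq_false
      rintro ⟨h1, -, -, -⟩; omega
  · rw [if_neg hkn]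
    apply List.filter_eq_nil_iff.mpr
    intro r hr
    rw [List.mem_range'_1] at hr
    unfold goodRun
    simp only [decide_eq_true_eq]
    rintro ⟨h1, h2, h3, h4⟩
    by_cases hc : r + n' = cs.length
    · have hkgt : n' < k := by omega
      rcases h3 with h0 | hne
      · omega
      · exact hne (hrun (r - 1) (by omega) (by omega))
    · rcases h4 with h0 | hne
      · exact hc h0
      · exact hne (hrun (r + n') (by omega) (by omega))

-- At a non-player cell at index i, a pending run of length k is good iff k = n'.
lemma filter_mid (n' k i : Nat) (hn : 1 ≤ n') (player : Int) (cs : List Int)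
    (hik : k ≤ i) (hil : i < cs.length)
    (hrun : ∀ j, j < i → i - k ≤ j → cs.getD j 0 = player)
    (hx : cs.getD i 0 ≠ player)
    (hb : i - k = 0 ∨ cs.getD (i - k - 1) 0 ≠ player) :
    (List.range' (i - k) (k + 1)).filter (goodRun n' player cs)
      = if k = n' then [i - n'] else [] := by
  by_cases hkn : k = n'
  · subst hkn
    rw [if_pos rfl]
    apply filter_range'_eq_singleton _ _ _ _ (by omega) (by omega)
    · unfold goodRun
      apply decide_eq_true
      refine ⟨by omega, ?_, ?_, Or.inr (by rw [show i - k + k = i by omega]; exact hx)⟩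
      · intro j hj1 hj2
        exact hrun j (by omega) (by omega)
      · rcases hb with h | h
        · exact Or.inl h
        · exact Or.inr h
    · intro r hr1 hr2 hra
      unfold goodRun
      apply decide_eq_false
      rintro ⟨h1, h2, -, -⟩
      exact hx (h2 i (by omega) (by omega))
  · rw [if_neg hkn]
    apply List.filter_eq_nil_iff.mpr
    intro r hr
    rw [List.mem_range'_1] at hr
    unfold goodRun
    simp only [decide_eq_true_eq]
    rintro ⟨h1, h2, h3, h4⟩
    by_cases hc : r + n' ≤ i
    · have hc2 : r + n' = i := by
        by_contra hc3
        rcases h4 with h0 | hne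
        · omega
        · exact hne (hrun (r + n') (by omega) (by omega))
      rcases h3 with h0 | hne
      · omega
      · exact hne (hrun (r - 1) (by omega) (by omega))
    · exact hx (h2 i (by omega) (by omega))

-- B's scan characterised: processing the suffix of cs from index i with a pending run of
-- length k emits exactly the good positions from i - k on.
lemma scan_spec (n' : Nat) (hn : 1 ≤ n') (player col : Int) (cs : List Int)
    (i k : Nat) (ans : List (Int × Int))
    (hik : k ≤ i) (hi : i ≤ cs.length)
    (hrun : ∀ j, j < i → i - k ≤ j → cs.getD j 0 = player)
    (hb : i - k = 0 ∨ cs.getD (i - k - 1) 0 ≠ player) :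
    (let p := (PySem.List.enumerate (cs.drop i) (i : Int)).foldl
        (fun (s : List (Int × Int) × Int) rx =>
          if rx.2 = player then (s.1, s.2 + 1)
          else (if s.2 = (n' : Int) then s.1 ++ [(rx.1 - (n' : Int), col)] else s.1, 0))
        (ans, (k : Int))
     if p.2 = (n' : Int) then p.1 ++ [((cs.length : Int) - (n' : Int), col)] else p.1)
    = ans ++ ((List.range' (i - k) (cs.length - (i - k))).filter (goodRun n' player cs)).map
        (fun r : Nat => ((r : Int), col)) := by
  obtain ⟨d, hd⟩ : ∃ d, cs.length - i = d := ⟨_, rfl⟩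
  induction d generalizing i k ans with
  | zero =>
    have hieq : i = cs.length := by omega
    subst hieq
    rw [List.drop_of_length_le (le_refl _)]
    simp only [PySem.List.enumerate_nil, List.foldl_nil]
    rw [show cs.length - (cs.length - k) = k by omega]
    rw [filter_end n' k hn player cs (by omega) hrun hb]
    by_cases hkn : k = n'
    · rw [if_pos (by exact_mod_cast congrArg (Nat.cast : Nat → Int) hkn), if_pos hkn]
      simp [Nat.cast_sub (show n' ≤ cs.length by omega)]
    · rw [if_neg (by exact_mod_cast hkn), if_neg hkn]
      simp
  | succ d ih =>
    have hil : i < cs.length := by omega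
    rw [List.drop_eq_getElem_cons hil, PySem.List.enumerate_cons, List.foldl_cons]
    have hgetD : cs[i] = cs.getD i 0 := (List.getD_eq_getElem cs 0 hil).symm
    dsimp only
    rw [hgetD]
    by_cases hx : cs.getD i 0 = player
    · rw [if_pos hx]
      have heq := ih (i + 1) (k + 1) ans (by omega) (by omega)
        (by intro j hj1 hj2
            rw [show i + 1 - (k + 1) = i - k from by omega] at hj2
            rcases Nat.lt_or_ge j i with h | h
            · exact hrun j h hj2
            · have hji : j = i := by omega
              subst hji; exact hx)
        (by rw [show i + 1 - (k + 1) = i - k from by omega]; exact hb)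
        (by omega)
      rw [show i + 1 - (k + 1) = i - k from by omega] at heq
      dsimp only at heq
      push_cast at heq
      rw [heq]
    · rw [if_neg hx]
      have hsplit : List.range' (i - k) (cs.length - (i - k))
          = List.range' (i - k) (k + 1) ++ List.range' (i + 1) (cs.length - (i + 1)) := by
        have hra := List.range'_append (s := i - k) (m := k + 1) (n := cs.length - (i + 1)) (step := 1)
        simp only [one_mul] at hra
        rw [show i - k + (k + 1) = i + 1 from by omega,
            show k + 1 + (cs.length - (i + 1)) = cs.length - (i - k) from by omega] at hra
        exact hra.symm
      have heq := ih (i + 1) 0 (if (k : Int) = (n' : Int) then ans ++ [((i : Int) - (n' : Int), col)] else ans)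
        (by omega) (by omega)
        (by intro j hj1 hj2; omega)
        (by right; rw [show i + 1 - 0 - 1 = i from by omega]; exact hx)
        (by omega)
      rw [show i + 1 - 0 = i + 1 from by omega] at heq
      dsimp only at heq
      push_cast at heq
      rw [heq, hsplit, List.filter_append, List.map_append]
      rw [filter_mid n' k i hn player cs hik hil hrun hx hb]
      by_cases hkn : k = n'
      · rw [if_pos (by exact_mod_cast congrArg (Nat.cast : Nat → Int) hkn), if_pos hkn]
        simp [Nat.cast_sub (show n' ≤ i from by omega)]
      · rw [if_neg (by exact_mod_cast hkn), if_neg hkn]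
        simp

lemma enumerate_map {α β : Type} (g : α → β) (l : List α) (s : Int) :
    PySem.List.enumerate (l.map g) s = (PySem.List.enumerate l s).map (fun rx => (rx.1, g rx.2)) := by
  induction l generalizing s with
  | nil => simp [PySem.List.enumerate_nil]
  | cons x xs ih => simp [PySem.List.enumerate_cons, ih]

lemma checkColsForNonly_eq_alt (n : Int) (matrix : List (List Int)) (player : Int)
    (hn : 1 ≤ n) :
    checkColsForNonly n matrix player = checkColsForNonly_alt n matrix player := by
  obtain ⟨n', rfl⟩ : ∃ n' : Nat, n = (n' : Int) := ⟨n.toNat, by omega⟩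
  have hn' : 1 ≤ n' := by exact_mod_cast hn
  unfold checkColsForNonly checkColsForNonly_alt
  dsimp only
  apply PySem.List.foldl_congr_mem
  intro acc col hcol
  set g : List Int → Int := fun r => PySem.List.pyGetD r col 0 with hg
  have hca : (PySem.List.pyRange 0 (PySem.List.len matrix) 1).foldl
      (fun col_arr row => col_arr ++ [PySem.List.pyGetD (PySem.List.pyGetD matrix row []) col 0]) []
      = matrix.map g := by
    rw [PySem.List.foldl_append_singleton_eq_map, List.nil_append]
    rw [show (fun row => PySem.List.pyGetD (PySem.List.pyGetD matrix row []) col 0)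
          = (g ∘ fun row => PySem.List.pyGetD matrix row []) from rfl]
    rw [← List.map_map, PySem.List.map_pyGetD_pyRange_zero]
  rw [hca]
  set cs : List Int := matrix.map g with hcs
  have hL : cs.length = matrix.length := by simp [hcs]
  -- A's inner loop is a filter of goodRun over all positions
  rw [PySem.List.foldl_append_ite
    (p := fun rows2 => PySem.List.pyRepeat [player] (n' : Int) = PySem.List.slice cs (some rows2) (some (rows2 + (n' : Int))) ∧
        pyCheckUp cs rows2 = true ∧ pyCheckDown cs (rows2 + (n' : Int)) = true)
    (f := fun rows2 => (rows2, col))]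
  rw [PySem.List.len_eq, PySem.List.pyRange_zero_nat cs.length]
  rw [List.filter_map, List.map_map]
  simp only [Function.comp_def]
  rw [List.filter_congr (fun r _ => condA_eq_good n' hn' player cs r)]
  -- B's inner loop is the scan over the same column
  have henum : PySem.List.enumerate cs 0
      = (PySem.List.pyRange 0 (PySem.List.len matrix) 1).map
          (fun j => ((j : Int), g (PySem.List.pyGetD matrix j []))) := by
    rw [hcs, enumerate_map, PySem.List.enumerate_eq_map_pyRange matrix [], List.map_map]
    rfl
  have hB : (PySem.List.pyRange 0 (PySem.List.len matrix) 1).foldl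
      (fun (s : List (Int × Int) × Int) row =>
        if PySem.List.pyGetD (PySem.List.pyGetD matrix row []) col 0 = player then (s.1, s.2 + 1)
        else (if s.2 = (n' : Int) then s.1 ++ [(row - (n' : Int), col)] else s.1, 0)) (acc, 0)
      = (PySem.List.enumerate cs 0).foldl
        (fun (s : List (Int × Int) × Int) rx =>
          if rx.2 = player then (s.1, s.2 + 1)
          else (if s.2 = (n' : Int) then s.1 ++ [(rx.1 - (n' : Int), col)] else s.1, 0)) (acc, 0) := by
    rw [henum, List.foldl_map]
  rw [hB]
  have hscan := scan_spec n' hn' player col cs 0 0 acc (by omega) (by omega)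
    (by intro j hj1 hj2; omega) (Or.inl rfl)
  rw [List.drop_zero] at hscan
  dsimp only at hscan
  push_cast at hscan
  rw [show PySem.List.len matrix = ((cs.length : Nat) : Int) from by rw [PySem.List.len_eq, hL]]
  rw [hscan]
  simp [List.range_eq_range']

-- ===== VERDICT (by name: the statement is the Claim_ definition above) =====
theorem checkColsForNonly_spec : Claim_equal_checkColsForNonly := by
  intro n matrix player _ hpre
  unfold Spec_checkColsForNonly
  exact checkColsForNonly_eq_alt n matrix player hpre.1
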